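-- pv_equiv track=rewrite | github.com/breezy-team/breezy | bzrlib/mdiff.py | linesplit
-- ===== SOURCE A (Python) =====
-- def linesplit(a):
--     """Split into two lists: content and line positions.
--
--     This returns (al, ap).
--
--     al[i] is the string content of line i of the file, including its
--     newline (if any).
--
--     ap[i] is the byte position in the file where that line starts.
--
--     ap[-1] is the byte position of the end of the file (i.e. the
--     length of the file.)
--
--     This transformation allows us to do a line-based diff and then map
--     back to byte positions.
--     """
--
--     al, ap = [], []
--     last = 0
--
--     n = a.find("\n") + 1
--     while n > 0:
--         ap.append(last)
--         al.append(a[last:n])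
--         last = n
--         n = a.find("\n", n) + 1
--
--     if last < len(a):
--         al.append(a[last:])
--         ap.append(last)
--
--     # position at the end
--     ap.append(len(a))
--
--     return (al, ap)
-- ===== SOURCE B (Python) =====
-- def linesplit(a):
--     """Single left-to-right character scan with a line buffer (alternative to
--     repeated str.find + slicing)."""
--     al, ap = [], []
--     start = 0
--     buf = []
--     for i, ch in enumerate(a):
--         buf.append(ch)
--         if ch == '\n':
--             ap.append(start)
--             al.append(''.join(buf))
--             start = i + 1
--             buf = []
--     if buf:
--         ap.append(start)
--         al.append(''.join(buf))
--     ap.append(len(a))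
--     return (al, ap)
-- ===== Notes on version B (the rewrite author's own statement) =====
-- stated objective: alternative
-- what changed: A repeatedly calls str.find for the next newline and slices each line out of the string; B makes a single left-to-right pass over enumerate(a), buffering characters and flushing the buffer as a line at each newline.
import Mathlib
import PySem

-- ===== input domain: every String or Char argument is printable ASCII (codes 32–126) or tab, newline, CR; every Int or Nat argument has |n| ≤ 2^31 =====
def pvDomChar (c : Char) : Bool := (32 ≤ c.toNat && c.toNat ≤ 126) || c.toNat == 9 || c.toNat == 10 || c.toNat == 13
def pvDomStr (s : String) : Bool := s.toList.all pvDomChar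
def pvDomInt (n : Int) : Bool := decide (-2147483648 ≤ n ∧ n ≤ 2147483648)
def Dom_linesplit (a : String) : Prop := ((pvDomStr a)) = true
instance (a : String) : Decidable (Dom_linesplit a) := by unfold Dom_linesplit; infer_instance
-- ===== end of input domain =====

-- B replaces A's repeated str.find + slicing by a single left-to-right character
-- scan carrying a line buffer (objective: alternative decomposition, same cost).


-- ===== PORT A =====
-- A's while loop: n = a.find("\n", last) + 1; fuel (length+1) only makes the
-- recursion total — each iteration strictly advances `last`.
def linesplitLoop (s : List Char) : Nat → Nat → List (List Char) → List Int →
    List (List Char) × List Int × Nat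
  | 0, last, al, ap => (al, ap, last)
  | fuel + 1, last, al, ap =>
    let n : Int := PySem.Chars.findFrom s ['\n'] (last : Int) none + 1
    if 0 < n then
      linesplitLoop s fuel n.toNat
        (al ++ [PySem.List.slice s (some (last : Int)) (some n)])
        (ap ++ [(last : Int)])
    else (al, ap, last)

def linesplit (a : String) : List String × List Int :=
  let s := a.toList
  let r := linesplitLoop s (s.length + 1) 0 [] []
  let al := r.1
  let ap := r.2.1
  let last := r.2.2
  let p :=
    if last < s.length then
      (al ++ [PySem.List.slice s (some (last : Int)) none], ap ++ [(last : Int)])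
    else (al, ap)
  (p.1.map String.ofList, p.2 ++ [(s.length : Int)])

-- ===== PORT B =====
-- B's for-loop over enumerate(a): buffer the current line, flush on '\n'.
def linesplitScan : List (Int × Char) → Int → List Char → List (List Char) → List Int →
    List (List Char) × List Int × Int × List Char
  | [], start, buf, al, ap => (al, ap, start, buf)
  | (i, ch) :: rest, start, buf, al, ap =>
    let buf := buf ++ [ch]
    if ch = '\n' then linesplitScan rest (i + 1) [] (al ++ [buf]) (ap ++ [start])
    else linesplitScan rest start buf al ap

def linesplit_alt (a : String) : List String × List Int :=
  let s := a.toList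
  let r := linesplitScan (PySem.List.enumerate s 0) 0 [] [] []
  let al := r.1
  let ap := r.2.1
  let start := r.2.2.1
  let buf := r.2.2.2
  let p := if buf ≠ [] then (al ++ [buf], ap ++ [start]) else (al, ap)
  (p.1.map String.ofList, p.2 ++ [(s.length : Int)])

-- ===== PRECONDITION & SPEC =====
def Spec_linesplit (a : String) (out : List String × List Int) : Prop := out = linesplit_alt a
instance (a : String) (out : List String × List Int) : Decidable (Spec_linesplit a out) := by unfold Spec_linesplit; infer_instance

-- ===== CLAIM (what is proved, stated in full; the proofs are below) =====
def Claim_equal_linesplit : Prop := ∀ (a : String), Dom_linesplit a → Spec_linesplit a (linesplit a)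

-- ===== LEMMAS AND PROOFS =====

-- canonical splitter: full (newline-terminated) lines of t, and the leftover tail
def nlSplit : List Char → List (List Char) × List Char
  | [] => ([], [])
  | c :: r =>
    if c = '\n' then (['\n'] :: (nlSplit r).1, (nlSplit r).2)
    else
      match (nlSplit r).1 with
      | [] => ([], c :: (nlSplit r).2)
      | l :: ls => ((c :: l) :: ls, (nlSplit r).2)

-- byte positions of the lines, starting at p
def startsN : List (List Char) → Nat → List Int
  | [], _ => []
  | l :: ls, p => (p : Int) :: startsN ls (p + l.length)


theorem nlSplit_flatten (t : List Char) : ((nlSplit t).1).flatten ++ (nlSplit t).2 = t := by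
  induction t with
  | nil => simp [nlSplit]
  | cons c r ih =>
    by_cases hc : c = '\n'
    · subst hc; simpa [nlSplit] using ih
    · cases h : (nlSplit r).1 with
      | nil => rw [h] at ih; simp at ih; simp [nlSplit, hc, h, ih]
      | cons l ls => rw [h] at ih; simp [nlSplit, hc, h]; simpa using ih

theorem nlSplit_no_nl {t : List Char} (h : '\n' ∉ t) : nlSplit t = ([], t) := by
  induction t with
  | nil => simp [nlSplit]
  | cons c r ih =>
    have hc : c ≠ '\n' := fun hh => h (hh ▸ List.mem_cons_self)
    have hr : '\n' ∉ r := fun hh => h (List.mem_cons_of_mem _ hh)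
    simp [nlSplit, hc, ih hr]

theorem nlSplit_full {bl rest : List Char} (h : '\n' ∉ bl) :
    nlSplit (bl ++ '\n' :: rest) = ((bl ++ ['\n']) :: (nlSplit rest).1, (nlSplit rest).2) := by
  induction bl with
  | nil => simp [nlSplit]
  | cons c bl ih =>
    have hc : c ≠ '\n' := fun hh => h (hh ▸ List.mem_cons_self)
    have hbl : '\n' ∉ bl := fun hh => h (List.mem_cons_of_mem _ hh)
    simp [nlSplit, hc, ih hbl]
theorem find_newline_eq {t bl rest : List Char} (hd : t = bl ++ '\n' :: rest)
    (h : '\n' ∉ bl) : PySem.Chars.find t ['\n'] = (bl.length : Int) := by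
  have h1 : ['\n'] <+: t.drop bl.length := by
    subst hd; rw [List.drop_left]; exact ⟨rest, rfl⟩
  have h2 : ∀ i, i < bl.length → ¬ ['\n'] <+: t.drop i := by
    intro i hi hpre
    obtain ⟨v, hv⟩ := hpre
    have hget : t[i]? = some '\n' := by
      rw [← List.head?_drop, ← hv]; rfl
    have hbl : t[i]? = bl[i]? := by subst hd; exact List.getElem?_append_left hi
    have : bl[i]? = some '\n' := hbl ▸ hget
    exact h (List.mem_of_getElem? this)
  have h0 : 0 ≤ PySem.Chars.find t ['\n'] := by
    rw [PySem.Chars.find_nonneg_iff]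
    exact (h1.isInfix).trans (List.drop_suffix _ _).isInfix
  obtain ⟨hp, hmin⟩ := PySem.Chars.find_spec h0
  have hne : (PySem.Chars.find t ['\n']).toNat = bl.length := by
    rcases Nat.lt_trichotomy (PySem.Chars.find t ['\n']).toNat bl.length with hlt | heq | hgt
    · exact absurd hp (h2 _ hlt)
    · exact heq
    · exact absurd h1 (hmin _ hgt)
  omega
theorem nl_decomp {t : List Char} (h : '\n' ∈ t) :
    ∃ bl rest, t = bl ++ '\n' :: rest ∧ '\n' ∉ bl := by
  induction t with
  | nil => simp at h
  | cons c r ih =>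
    by_cases hc : c = '\n'
    · exact ⟨[], r, by simp [hc], by simp⟩
    · have hr : '\n' ∈ r := by
        rcases List.mem_cons.mp h with h' | h'
        · exact absurd h'.symm hc
        · exact h'
      obtain ⟨bl, rest, he, hn⟩ := ih hr
      refine ⟨c :: bl, rest, by simp [he], ?_⟩
      intro hh
      rcases List.mem_cons.mp hh with h' | h'
      · exact hc h'.symm
      · exact hn h'

theorem loopA_spec (fuel : Nat) : ∀ (s : List Char) (last : Nat)
    (al : List (List Char)) (ap : List Int), last ≤ s.length → s.length - last < fuel →
    linesplitLoop s fuel last al ap =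
      (al ++ (nlSplit (s.drop last)).1,
       ap ++ startsN ((nlSplit (s.drop last)).1) last,
       last + ((nlSplit (s.drop last)).1).flatten.length) := by
  induction fuel with
  | zero => intro s last al ap _ hf; omega
  | succ fuel ih =>
    intro s last al ap hlast hf
    have hff := PySem.Chars.findFrom_natCast s ['\n'] last hlast
    by_cases hmem : '\n' ∈ s.drop last
    · obtain ⟨bl, rest, he, hn⟩ := nl_decomp hmem
      have hfind : PySem.Chars.find (s.drop last) ['\n'] = (bl.length : Int) :=
        find_newline_eq he hn
      have hlen : (s.drop last).length = s.length - last := List.length_drop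
      have hlen2 : (s.drop last).length = bl.length + 1 + rest.length := by simp [he]; omega
      have hn0 : PySem.Chars.findFrom s ['\n'] (last : Int) none + 1 =
          ((last + bl.length + 1 : Nat) : Int) := by
        rw [hff, hfind, if_neg (by omega)]
        push_cast; ring
      have hstep : linesplitLoop s (fuel + 1) last al ap =
          linesplitLoop s fuel (last + bl.length + 1)
            (al ++ [PySem.List.slice s (some (last : Int))
              (some ((last + bl.length + 1 : Nat) : Int))])
            (ap ++ [(last : Int)]) := by
        show (if 0 < PySem.Chars.findFrom s ['\n'] (last : Int) none + 1 then
          linesplitLoop s fuel (PySem.Chars.findFrom s ['\n'] (last : Int) none + 1).toNat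
            (al ++ [PySem.List.slice s (some (last : Int))
              (some (PySem.Chars.findFrom s ['\n'] (last : Int) none + 1))])
            (ap ++ [(last : Int)]) else (al, ap, last)) = _
        rw [hn0, if_pos (by positivity), Int.toNat_natCast]
      rw [hstep]
      have hslice : PySem.List.slice s (some (last : Int))
          (some ((last + bl.length + 1 : Nat) : Int)) = bl ++ ['\n'] := by
        rw [PySem.List.slice_toNat s (by positivity) (by positivity)]
        rw [Int.toNat_natCast, Int.toNat_natCast]
        have h1 : last + bl.length + 1 - last = bl.length + 1 := by omega
        rw [h1, he]
        have := List.take_length_add_append (l₁ := bl) (l₂ := '\n' :: rest) 1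
        simpa using this
      have hdrop : s.drop (last + bl.length + 1) = rest := by
        rw [show last + bl.length + 1 = last + (bl.length + 1) by ring, ← List.drop_drop, he]
        simp
      rw [ih s (last + bl.length + 1) _ _ (by omega) (by omega)]
      rw [hdrop, he, nlSplit_full hn, hslice]
      simp [startsN, Prod.ext_iff]
      constructor
      · ring_nf
      · omega
    · have hfind : PySem.Chars.find (s.drop last) ['\n'] = -1 := by
        rw [PySem.Chars.find_eq_neg_one_iff, List.singleton_infix_iff]
        exact hmem
      have hend : linesplitLoop s (fuel + 1) last al ap = (al, ap, last) := by
        show (if 0 < PySem.Chars.findFrom s ['\n'] (last : Int) none + 1 then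
          linesplitLoop s fuel (PySem.Chars.findFrom s ['\n'] (last : Int) none + 1).toNat
            (al ++ [PySem.List.slice s (some (last : Int))
              (some (PySem.Chars.findFrom s ['\n'] (last : Int) none + 1))])
            (ap ++ [(last : Int)]) else (al, ap, last)) = _
        rw [hff, hfind, if_pos rfl]
        norm_num
      rw [hend, nlSplit_no_nl hmem]
      simp [startsN]
theorem scan_no_nl {r : List Char} (h : '\n' ∉ r) : ∀ (i0 start : Int) (b : List Char)
    (al : List (List Char)) (ap : List Int),
    linesplitScan (PySem.List.enumerate r i0) start b al ap = (al, ap, start, b ++ r) := by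
  induction r with
  | nil => intro i0 start b al ap; simp [PySem.List.enumerate_nil, linesplitScan]
  | cons c r ih =>
    intro i0 start b al ap
    have hc : c ≠ '\n' := fun hh => h (hh ▸ List.mem_cons_self)
    have hr : '\n' ∉ r := fun hh => h (List.mem_cons_of_mem _ hh)
    rw [PySem.List.enumerate_cons]
    show linesplitScan _ _ _ _ _ = _
    simp only [linesplitScan, hc, if_false]
    rw [ih hr]
    simp

theorem scan_line {bl : List Char} (h : '\n' ∉ bl) : ∀ (rest : List Char)
    (i0 start : Int) (b : List Char) (al : List (List Char)) (ap : List Int),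
    linesplitScan (PySem.List.enumerate (bl ++ '\n' :: rest) i0) start b al ap =
      linesplitScan (PySem.List.enumerate rest (i0 + bl.length + 1)) (i0 + bl.length + 1) []
        (al ++ [b ++ bl ++ ['\n']]) (ap ++ [start]) := by
  induction bl with
  | nil =>
    intro rest i0 start b al ap
    rw [List.nil_append, PySem.List.enumerate_cons]
    simp only [linesplitScan, if_true]
    norm_num
  | cons c bl ih =>
    intro rest i0 start b al ap
    have hc : c ≠ '\n' := fun hh => h (hh ▸ List.mem_cons_self)
    have hbl : '\n' ∉ bl := fun hh => h (List.mem_cons_of_mem _ hh)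
    rw [List.cons_append, PySem.List.enumerate_cons]
    simp only [linesplitScan, if_neg hc]
    rw [ih hbl]
    congr 2
    all_goals first
      | (push_cast [List.length_cons]; ring)
      | simp

theorem scan_spec_aux (N : Nat) : ∀ (r : List Char), r.length ≤ N →
    ∀ (last : Nat) (al : List (List Char)) (ap : List Int),
    linesplitScan (PySem.List.enumerate r (last : Int)) (last : Int) [] al ap =
      (al ++ (nlSplit r).1,
       ap ++ startsN ((nlSplit r).1) last,
       ((last + ((nlSplit r).1).flatten.length : Nat) : Int),
       (nlSplit r).2) := by
  induction N with
  | zero =>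
    intro r hr last al ap
    have : r = [] := List.eq_nil_of_length_eq_zero (by omega)
    subst this
    simp [PySem.List.enumerate_nil, linesplitScan, nlSplit, startsN]
  | succ N ih =>
    intro r hr last al ap
    by_cases hmem : '\n' ∈ r
    · obtain ⟨bl, rest, he, hn⟩ := nl_decomp hmem
      subst he
      rw [scan_line hn]
      have hcast : ((last : Int) + bl.length + 1) = ((last + bl.length + 1 : Nat) : Int) := by
        push_cast; ring
      rw [hcast, ih rest (by simp at hr ⊢; omega)]
      rw [nlSplit_full hn]
      simp [startsN, Prod.ext_iff]
      exact ⟨by rw [show last + bl.length + 1 = last + (bl.length + 1) by ring], by ring⟩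
    · rw [scan_no_nl hmem, nlSplit_no_nl hmem]
      simp [startsN]

theorem linesplit_spec : Claim_equal_linesplit := by
  intro a _
  unfold Spec_linesplit linesplit linesplit_alt
  set s := a.toList with hs
  have hA := loopA_spec (s.length + 1) s 0 [] [] (by omega) (by omega)
  have hB := scan_spec_aux s.length s (le_refl _) 0 [] []
  rw [List.drop_zero] at hA
  have h0 : ((0 : Nat) : Int) = (0 : Int) := rfl
  rw [h0] at hB
  simp only [hA, hB, List.nil_append]
  set L := (nlSplit s).1 with hL
  set v := (nlSplit s).2 with hv
  have hflat : L.flatten ++ v = s := nlSplit_flatten s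
  have hlen : L.flatten.length + v.length = s.length := by
    rw [← hflat]; simp
  by_cases hvnil : v = []
  · have hno : ¬ (0 + L.flatten.length < s.length) := by
      have h2 : v.length = 0 := by rw [hvnil]; rfl
      omega
    rw [if_neg hno, if_neg (by simp [hvnil])]
  · have hlt : 0 + L.flatten.length < s.length := by
      have : v.length ≠ 0 := fun hh => hvnil (List.eq_nil_of_length_eq_zero hh)
      omega
    have hslice : PySem.List.slice s (some ((0 + L.flatten.length : Nat) : Int)) none = v := by
      rw [PySem.List.slice_from s (by positivity), Int.toNat_natCast]
      have hdropv : s.drop (L.flatten.length) = v := by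
        rw [← hflat]; exact List.drop_left
      simpa using hdropv
    rw [if_pos hlt, if_pos hvnil, hslice]
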